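-- pv_equiv track=rewrite | github.com/cdy3870/Predicting-Flight-Modes | flight_mode_preprocess.py | remap_y
-- ===== SOURCE A (Python) =====
-- from collections import Counter
-- from collections import Counter
--
-- def remap_y(y):
-- 	counts = dict(Counter(y))
-- 	new_mapping = {}
-- 	new_y = []
-- 	for i, value in enumerate(counts.keys()):
-- 		new_mapping[value] = i
--
-- 	for i in y:
-- 		new_y.append(new_mapping[i])
--
-- 	new_mapping = {value:key for key,value in new_mapping.items()}
--
-- 	return new_y, new_mapping
-- ===== SOURCE B (Python) =====
-- def remap_y(y):
-- 	# single pass: build forward and reverse maps together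
-- 	mapping = {}
-- 	rev = {}
-- 	new_y = []
-- 	for x in y:
-- 		if x not in mapping:
-- 			idx = len(mapping)
-- 			mapping[x] = idx
-- 			rev[idx] = x
-- 		new_y.append(mapping[x])
-- 	return new_y, rev
-- ===== Notes on version B (the rewrite author's own statement) =====
-- stated objective: simpler
-- what changed: Replaces A's three phases (Counter table, enumerate loop building the forward map, remap loop, then a dict-inversion comprehension) by one traversal of y that assigns ids on first appearance and builds the forward and reverse maps together.
import Mathlib
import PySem

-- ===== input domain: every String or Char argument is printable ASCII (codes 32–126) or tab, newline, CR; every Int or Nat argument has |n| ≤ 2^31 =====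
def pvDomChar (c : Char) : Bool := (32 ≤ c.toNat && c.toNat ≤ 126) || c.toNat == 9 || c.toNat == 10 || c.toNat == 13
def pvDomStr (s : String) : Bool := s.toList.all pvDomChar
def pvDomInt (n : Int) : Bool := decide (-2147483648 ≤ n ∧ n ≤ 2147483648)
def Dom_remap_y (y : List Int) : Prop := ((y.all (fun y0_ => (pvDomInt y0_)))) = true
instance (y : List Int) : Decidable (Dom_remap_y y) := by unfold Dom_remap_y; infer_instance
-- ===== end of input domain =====

-- B collapses A's Counter/enumerate/remap/invert phases into one pass over y that
-- assigns ids on first appearance and builds the forward and reverse maps together (objective: simpler).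


-- ===== PORT A =====
def remap_y (y : List Int) : List Int × (List (Int × Int)) :=
  let counts : PySem.Dict Int Int := PySem.Dict.counter y
  let new_mapping : PySem.Dict Int Int :=
    (PySem.List.enumerate counts.keys 0).foldl (fun d p => d.insert p.2 p.1) PySem.Dict.empty
  -- new_mapping[i]: the key is always present (counts.keys covers y), so Python never raises; getD's default is unused
  let new_y : List Int := y.foldl (fun acc i => acc ++ [new_mapping.getD i 0]) []
  let inverted : PySem.Dict Int Int :=
    new_mapping.items.foldl (fun d p => d.insert p.2 p.1) PySem.Dict.empty
  (new_y, inverted.items)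

-- ===== PORT B =====
def remap_y_alt (y : List Int) : List Int × (List (Int × Int)) :=
  let st := y.foldl (fun st x =>
      match st.1.get? x with
      | some i => (st.1, st.2.1, st.2.2 ++ [i])
      | none => (st.1.insert x (st.1.size : Int),
                 st.2.1.insert (st.1.size : Int) x,
                 st.2.2 ++ [(st.1.size : Int)]))
    ((PySem.Dict.empty : PySem.Dict Int Int), (PySem.Dict.empty : PySem.Dict Int Int), ([] : List Int))
  (st.2.2, st.2.1.items)

-- ===== PRECONDITION & SPEC =====
def Spec_remap_y (y : List Int) (out : List Int × (List (Int × Int))) : Prop := out = remap_y_alt y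
instance (y : List Int) (out : List Int × (List (Int × Int))) : Decidable (Spec_remap_y y out) := by unfold Spec_remap_y; infer_instance

-- ===== CLAIM (what is proved, stated in full; the proofs are below) =====
def Claim_equal_remap_y : Prop := ∀ (y : List Int), Dom_remap_y y → Spec_remap_y y (remap_y y)

-- ===== LEMMAS AND PROOFS =====

-- forward map of a distinct list s : value ↦ its index (as built by A on counts.keys)
def fwdMap (s : List Int) : PySem.Dict Int Int :=
  (PySem.List.enumerate s 0).foldl (fun d p => d.insert p.2 p.1) PySem.Dict.empty

-- reverse map of a distinct list s : index ↦ value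
def revMap (s : List Int) : PySem.Dict Int Int :=
  (PySem.List.enumerate s 0).foldl (fun d p => d.insert p.1 p.2) PySem.Dict.empty

theorem items_fwdMap (s : List Int) (hs : s.Nodup) :
    (fwdMap s).items = (PySem.List.enumerate s 0).map (fun p => (p.2, p.1)) := by
  unfold fwdMap
  rw [PySem.Dict.items_foldl_insert_fresh (PySem.List.enumerate s 0) (fun p => p.2) (fun p => p.1)
    PySem.Dict.empty (by intro a _; simp [PySem.Dict.contains_empty])
    (by rw [PySem.List.map_snd_enumerate]; exact hs)]
  simp [PySem.Dict.empty]

theorem keys_fwdMap (s : List Int) (hs : s.Nodup) : (fwdMap s).keys = s := by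
  simp only [PySem.Dict.keys, items_fwdMap s hs, List.map_map]
  exact PySem.List.map_snd_enumerate s 0

theorem size_fwdMap (s : List Int) (hs : s.Nodup) : (fwdMap s).size = s.length := by
  simp [PySem.Dict.size, items_fwdMap s hs, PySem.List.length_enumerate]

theorem get?_fwdMap_of_mem (s : List Int) (hs : s.Nodup) (x : Int) (hx : x ∈ s) :
    (fwdMap s).get? x = some ((s.idxOf x : Nat) : Int) := by
  apply PySem.Dict.get?_of_mem_items
  · rw [items_fwdMap s hs, List.mem_map]
    refine ⟨((s.idxOf x : Nat), x), ?_, rfl⟩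
    rw [PySem.List.mem_enumerate_iff]
    exact ⟨s.idxOf x, List.idxOf_lt_length_of_mem hx, by simp [List.getElem_idxOf]⟩
  · rw [keys_fwdMap s hs]; exact hs

theorem get?_fwdMap_of_not_mem (s : List Int) (hs : s.Nodup) (x : Int) (hx : x ∉ s) :
    (fwdMap s).get? x = none := by
  rw [PySem.Dict.get?_eq_none_iff_not_mem_keys, keys_fwdMap s hs]; exact hx

theorem fwdMap_append (s : List Int) (x : Int) :
    fwdMap (s ++ [x]) = (fwdMap s).insert x (s.length : Int) := by
  simp [fwdMap, PySem.List.enumerate_append, PySem.List.enumerate_cons, PySem.List.enumerate_nil]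

theorem revMap_append (s : List Int) (x : Int) :
    revMap (s ++ [x]) = (revMap s).insert (s.length : Int) x := by
  simp [revMap, PySem.List.enumerate_append, PySem.List.enumerate_cons, PySem.List.enumerate_nil]

theorem idxOf_update_of_mem (s : List Int) (t : List Int) (x : Int) (hx : x ∈ s) :
    (PySem.Set.update s t).idxOf x = s.idxOf x := by
  rw [PySem.Set.update_eq_append_filter]
  exact List.idxOf_append_of_mem hx

theorem idxOf_append_self (s : List Int) (x : Int) (h : x ∉ s) :
    (s ++ [x]).idxOf x = s.length := by
  induction s with
  | nil => simp
  | cons a t ih =>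
    simp at h
    simp [Ne.symm h.1, ih h.2]

theorem B_loop (t : List Int) : ∀ (s : List Int) (out : List Int), s.Nodup →
    t.foldl (fun st x =>
      match st.1.get? x with
      | some i => (st.1, st.2.1, st.2.2 ++ [i])
      | none => (st.1.insert x (st.1.size : Int),
                 st.2.1.insert (st.1.size : Int) x,
                 st.2.2 ++ [(st.1.size : Int)]))
      (fwdMap s, revMap s, out)
    = (fwdMap (PySem.Set.update s t), revMap (PySem.Set.update s t),
       out ++ t.map (fun x => (((PySem.Set.update s t).idxOf x : Nat) : Int))) := by
  induction t with
  | nil => intro s out hs; simp [PySem.Set.update_nil]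
  | cons x t ih =>
    intro s out hs
    rw [List.foldl_cons]
    by_cases hx : x ∈ s
    · rw [show (match (fwdMap s).get? x with
        | some i => (fwdMap s, revMap s, out ++ [i])
        | none => ((fwdMap s).insert x ((fwdMap s).size : Int),
                   (revMap s).insert ((fwdMap s).size : Int) x,
                   out ++ [((fwdMap s).size : Int)]))
        = (fwdMap s, revMap s, out ++ [((s.idxOf x : Nat) : Int)]) from by
          rw [get?_fwdMap_of_mem s hs x hx]]
      rw [ih s _ hs, PySem.Set.update_cons, PySem.Set.add_of_mem hx]
      simp [idxOf_update_of_mem s t x hx]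
    · rw [show (match (fwdMap s).get? x with
        | some i => (fwdMap s, revMap s, out ++ [i])
        | none => ((fwdMap s).insert x ((fwdMap s).size : Int),
                   (revMap s).insert ((fwdMap s).size : Int) x,
                   out ++ [((fwdMap s).size : Int)]))
        = (fwdMap (s ++ [x]), revMap (s ++ [x]), out ++ [((s.length : Nat) : Int)]) from by
          rw [get?_fwdMap_of_not_mem s hs x hx]
          simp [size_fwdMap s hs, fwdMap_append, revMap_append]]
      have hnd : (s ++ [x]).Nodup := by
        simp [List.nodup_append, hs]
        rintro a ha rfl; exact hx ha
      rw [ih (s ++ [x]) _ hnd, PySem.Set.update_cons, PySem.Set.add_of_not_mem hx]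
      have hix : (PySem.Set.update (s ++ [x]) t).idxOf x = s.length := by
        rw [idxOf_update_of_mem (s ++ [x]) t x (by simp)]
        exact idxOf_append_self s x hx
      simp [hix]

-- ===== VERDICT (by name: the statement is the Claim_ definition above) =====
theorem remap_y_spec : Claim_equal_remap_y := by
  intro y _
  show remap_y y = remap_y_alt y
  have hnd : (PySem.Set.ofList y).Nodup := PySem.Set.nodup_ofList y
  -- B side
  have hB : remap_y_alt y =
      (y.map (fun x => (((PySem.Set.ofList y).idxOf x : Nat) : Int)),
       (revMap (PySem.Set.ofList y)).items) := by
    simp only [remap_y_alt]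
    have h0 : ((PySem.Dict.empty : PySem.Dict Int Int), (PySem.Dict.empty : PySem.Dict Int Int),
        ([] : List Int)) = (fwdMap [], revMap [], ([] : List Int)) := rfl
    rw [h0, B_loop y [] [] List.nodup_nil, PySem.Set.update_nil_left]
    simp
  -- A side
  have hA : remap_y y =
      (y.map (fun x => (((PySem.Set.ofList y).idxOf x : Nat) : Int)),
       (revMap (PySem.Set.ofList y)).items) := by
    simp only [remap_y]
    rw [PySem.Dict.keys_counter]
    have hm : (PySem.List.enumerate (PySem.Set.ofList y) 0).foldl
        (fun d p => d.insert p.2 p.1) PySem.Dict.empty = fwdMap (PySem.Set.ofList y) := rfl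
    rw [hm, PySem.List.foldl_append_singleton_eq_map, List.nil_append]
    have hy : y.map (fun i => (fwdMap (PySem.Set.ofList y)).getD i 0)
        = y.map (fun x => (((PySem.Set.ofList y).idxOf x : Nat) : Int)) := by
      apply List.map_congr_left
      intro i hi
      exact PySem.Dict.getD_of_get?_eq_some _ 0
        (get?_fwdMap_of_mem _ hnd i ((PySem.Set.mem_ofList y i).mpr hi))
    have hinv : (fwdMap (PySem.Set.ofList y)).items.foldl
        (fun d p => d.insert p.2 p.1) PySem.Dict.empty = revMap (PySem.Set.ofList y) := by
      rw [items_fwdMap _ hnd, List.foldl_map]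
      rfl
    rw [hy, hinv]
  rw [hA, hB]
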